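-- pv_equiv track=rewrite | github.com/hmy7788/ps | 프로그래머스/1/42748. K번째수/K번째수.py | solution
-- ===== SOURCE A (Python) =====
-- def solution(array, commands):
--     answer = []
--
--     for cmd in commands:
--         i = cmd[0]-1
--         j = cmd[1]-1
--         k = cmd[2]-1
--         slice_list = array[i:j+1]
--         sort_list = sorted(slice_list)
--         answer.append(sort_list[k])
--
--     return answer
-- ===== SOURCE B (Python) =====
-- def solution(array, commands):
--     answer = []
--     for cmd in commands:
--         seg = array[cmd[0]-1:cmd[1]]
--         s = []
--         for x in seg:
--             pos = 0
--             while pos < len(s) and s[pos] <= x: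
--                 pos += 1
--             s.insert(pos, x)
--         answer.append(s[cmd[2]-1])
--     return answer
-- ===== Notes on version B (the rewrite author's own statement) =====
-- stated objective: alternative
-- what changed: Replaces the per-command full library sort of the slice with an incremental insertion sort built element by element (insert each slice element into a kept-sorted list), then indexes the k-th element.
import Mathlib
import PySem

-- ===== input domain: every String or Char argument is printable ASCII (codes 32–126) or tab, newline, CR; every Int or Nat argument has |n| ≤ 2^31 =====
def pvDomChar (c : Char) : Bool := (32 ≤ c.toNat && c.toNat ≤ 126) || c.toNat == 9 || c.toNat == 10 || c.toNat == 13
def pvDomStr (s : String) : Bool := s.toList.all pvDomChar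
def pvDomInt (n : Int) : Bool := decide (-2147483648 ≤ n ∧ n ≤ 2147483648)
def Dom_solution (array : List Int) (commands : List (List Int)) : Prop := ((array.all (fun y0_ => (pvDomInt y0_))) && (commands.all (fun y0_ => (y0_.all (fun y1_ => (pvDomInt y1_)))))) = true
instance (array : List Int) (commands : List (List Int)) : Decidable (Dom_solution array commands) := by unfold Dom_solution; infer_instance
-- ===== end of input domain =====

-- B replaces the per-command library sort of the slice with an incremental insertion sort; alternative algorithm, not faster.


-- ===== PORT A =====
-- literal transliteration of A: per command, slice, full sort, index k (pyGetD is total; Pre_ guarantees the index is in range)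
def solution (array : List Int) (commands : List (List Int)) : List Int :=
  commands.foldl (fun answer cmd =>
    let i := PySem.List.pyGetD cmd 0 0 - 1
    let j := PySem.List.pyGetD cmd 1 0 - 1
    let k := PySem.List.pyGetD cmd 2 0 - 1
    let slice_list := PySem.List.slice array (some i) (some (j + 1))
    let sort_list := PySem.List.sorted slice_list (fun x => x) false
    answer ++ [PySem.List.pyGetD sort_list k 0]) []

-- ===== PORT B =====
-- Source B's inner while-loop + list.insert: insert x after all kept elements ≤ x
def insSorted (s : List Int) (x : Int) : List Int :=
  match s with
  | [] => [x]
  | y :: t => if y ≤ x then y :: insSorted t x else x :: y :: t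

def solution_alt (array : List Int) (commands : List (List Int)) : List Int :=
  commands.foldl (fun answer cmd =>
    let seg := PySem.List.slice array (some (PySem.List.pyGetD cmd 0 0 - 1)) (some (PySem.List.pyGetD cmd 1 0))
    let s := seg.foldl insSorted []
    answer ++ [PySem.List.pyGetD s (PySem.List.pyGetD cmd 2 0 - 1) 0]) []

-- ===== PRECONDITION & SPEC =====
-- Pre_ admits exactly the inputs where A returns: every command has ≥ 3 entries and the (possibly negative)
-- index cmd[2]-1 is a valid Python index into the sliced sub-list.
def Pre_solution (array : List Int) (commands : List (List Int)) : Prop :=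
  ∀ cmd ∈ commands, 3 ≤ cmd.length ∧
    PySem.Raise.InRange
      (PySem.List.slice array (some (PySem.List.pyGetD cmd 0 0 - 1)) (some (PySem.List.pyGetD cmd 1 0))).length
      (PySem.List.pyGetD cmd 2 0 - 1)
instance (array : List Int) (commands : List (List Int)) : Decidable (Pre_solution array commands) := by unfold Pre_solution; infer_instance

def pvWitness_solution : List Int × List (List Int) := ([1, 5, 2, 6, 3, 7, 4], [[2, 5, 3], [4, 4, 1], [1, 7, 3]])

def Spec_solution (array : List Int) (commands : List (List Int)) (out : List Int) : Prop := out = solution_alt array commands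
instance (array : List Int) (commands : List (List Int)) (out : List Int) : Decidable (Spec_solution array commands out) := by unfold Spec_solution; infer_instance

-- ===== CLAIM (what is proved, stated in full; the proofs are below) =====
def Claim_equal_solution : Prop := ∀ (array : List Int) (commands : List (List Int)), Dom_solution array commands → Pre_solution array commands → Spec_solution array commands (solution array commands)

-- ===== LEMMAS AND PROOFS =====

theorem insSorted_perm (s : List Int) (x : Int) : (insSorted s x).Perm (x :: s) := by
  induction s with
  | nil => simp [insSorted]
  | cons y t ih =>
    simp only [insSorted]
    split_ifs with h
    · exact ((ih.cons y).trans (List.Perm.swap x y t))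
    · exact List.Perm.refl _

theorem insSorted_pairwise (s : List Int) (x : Int) (hs : s.Pairwise (· ≤ ·)) :
    (insSorted s x).Pairwise (· ≤ ·) := by
  induction s with
  | nil => simp [insSorted]
  | cons y t ih =>
    rcases List.pairwise_cons.mp hs with ⟨hy, ht⟩
    simp only [insSorted]
    split_ifs with h
    · refine List.pairwise_cons.mpr ⟨?_, ih ht⟩
      intro z hz
      rcases List.mem_cons.mp ((insSorted_perm t x).mem_iff.mp hz) with rfl | hz
      · exact h
      · exact hy z hz
    · refine List.pairwise_cons.mpr ⟨?_, hs⟩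
      intro z hz
      rcases List.mem_cons.mp hz with rfl | hz
      · exact le_of_lt (not_le.mp h)
      · exact le_of_lt (lt_of_lt_of_le (not_le.mp h) (hy z hz))

theorem foldl_insSorted_perm (xs acc : List Int) :
    (xs.foldl insSorted acc).Perm (acc ++ xs) := by
  induction xs generalizing acc with
  | nil => simp
  | cons x t ih =>
    refine (ih (insSorted acc x)).trans ?_
    refine ((insSorted_perm acc x).append_right t).trans ?_
    simpa using (List.perm_middle (a := x) (l₁ := acc) (l₂ := t)).symm

theorem foldl_insSorted_pairwise (xs acc : List Int) (hacc : acc.Pairwise (· ≤ ·)) :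
    (xs.foldl insSorted acc).Pairwise (· ≤ ·) := by
  induction xs generalizing acc with
  | nil => exact hacc
  | cons x t ih => exact ih _ (insSorted_pairwise acc x hacc)

theorem sorted_eq_foldl_insSorted (xs : List Int) :
    PySem.List.sorted xs (fun x => x) false = xs.foldl insSorted [] := by
  refine PySem.List.sorted_id_eq_of_perm_of_pairwise _ _ ?_ ?_
  · simpa using foldl_insSorted_perm xs []
  · exact foldl_insSorted_pairwise xs [] (by simp)

theorem solution_spec : Claim_equal_solution := by
  intro array commands _ hpre
  unfold Spec_solution solution solution_alt
  rw [PySem.List.foldl_append_singleton_eq_map, PySem.List.foldl_append_singleton_eq_map]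
  refine List.map_congr_left ?_
  intro cmd hcmd
  rcases hpre cmd hcmd with ⟨_, _⟩
  have hb : PySem.List.pyGetD cmd 1 0 - 1 + 1 = PySem.List.pyGetD cmd 1 0 := by ring
  simp only [hb, sorted_eq_foldl_insSorted]
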